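-- pv_equiv track=rewrite | github.com/gillerick/Data-Structures-Algorithms | The Minion Game.py | staurt
-- ===== SOURCE A (Python) =====
-- def staurt(s):
--     score = 0
--     for c in s:
--         count = 0
--         if c != "a" or c != "e" or c != "i" or c != "o" or c != "u":
--             count += s.count(c, s.index(c), len(s))
--             score += count
--     return score
-- ===== SOURCE B (Python) =====
-- def staurt(s):
--     score = 0
--     run = 0
--     prev = None
--     for c in sorted(s):
--         if c == prev:
--             run += 1
--         else:
--             score += run * run
--             prev = c
--             run = 1
--     return score + run * run
-- ===== Notes on version B (the rewrite author's own statement) =====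
-- stated objective: faster
-- what changed: A sums, for every character position, a fresh count of that character over the whole string (quadratic rescanning); B sorts the characters once and accumulates run-length squares in a single grouped pass.
import Mathlib
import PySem

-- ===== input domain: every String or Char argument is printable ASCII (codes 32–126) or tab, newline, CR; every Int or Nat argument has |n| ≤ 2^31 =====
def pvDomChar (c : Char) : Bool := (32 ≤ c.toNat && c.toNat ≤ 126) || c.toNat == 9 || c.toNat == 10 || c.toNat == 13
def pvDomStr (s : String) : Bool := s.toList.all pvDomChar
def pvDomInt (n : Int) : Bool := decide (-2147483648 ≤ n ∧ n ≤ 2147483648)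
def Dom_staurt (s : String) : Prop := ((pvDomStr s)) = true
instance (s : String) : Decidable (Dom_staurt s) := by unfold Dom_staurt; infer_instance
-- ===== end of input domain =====

-- B sorts the characters once and sums squared run lengths in one pass, instead of A's per-position rescan of the whole string.

-- ===== PORT A =====
-- s.index(c) is ported as PySem.Chars.find s.toList [c]: exact here because c comes from s,
-- so the character is present and str.index agrees with str.find.
-- s.count(c, i, len(s)) has no 3-argument PySem primitive; for a single character c it is the
-- number of occurrences of c in s[i:len(s)], ported by hand as List.count on the slice (exact).
def staurt (s : String) : Int :=
  s.toList.foldl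
    (fun score c =>
      if c != 'a' || c != 'e' || c != 'i' || c != 'o' || c != 'u' then
        let count : Int :=
          ((PySem.List.slice s.toList (some (PySem.Chars.find s.toList [c]))
              (some (PySem.Chars.len s.toList))).count c : Int)
        score + count
      else score)
    0

-- ===== PORT B =====
-- state carried by the loop: (score, run, prev); final flush adds run * run.
def staurtStep(st : Int × Int × Option Char) (c : Char) : Int × Int × Option Char :=
  if (some c == st.2.2) then (st.1, st.2.1 + 1, st.2.2)
  else (st.1 + st.2.1 * st.2.1, 1, some c)

def staurt_alt (s : String) : Int :=
  let p := (PySem.List.sorted s.toList (fun x => x) false).foldl staurtStep (0, 0, none)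
  p.1 + p.2.1 * p.2.1

-- ===== PRECONDITION & SPEC =====
def Spec_staurt (s : String) (out : Int) : Prop := out = staurt_alt s
instance (s : String) (out : Int) : Decidable (Spec_staurt s out) := by unfold Spec_staurt; infer_instance

-- ===== CLAIM (what is proved, stated in full; the proofs are below) =====
def Claim_equal_staurt : Prop := ∀ (s : String), Dom_staurt s → Spec_staurt s (staurt s)

-- ===== LEMMAS AND PROOFS =====
def sqSum (m : List Char) : Int := (m.map (fun c => (m.count c : Int))).sum

lemma singleton_prefix_iff_head? (c : Char) (t : List Char) : [c] <+: t ↔ t.head? = some c := by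
  cases t with
  | nil => simp
  | cons x xs =>
    constructor
    · rintro ⟨u, hu⟩; simp at hu; simp [hu.1]
    · intro h; simp at h; exact ⟨xs, by simp [h]⟩

lemma count_drop_find (l : List Char) (c : Char) (hc : c ∈ l) :
    0 ≤ PySem.Chars.find l [c] ∧
      (l.drop (PySem.Chars.find l [c]).toNat).count c = l.count c := by
  have h0 : 0 ≤ PySem.Chars.find l [c] := by
    rw [PySem.Chars.find_nonneg_iff]; exact (List.singleton_infix_iff c l).mpr hc
  refine ⟨h0, ?_⟩
  obtain ⟨hpre, hmin⟩ := PySem.Chars.find_spec h0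
  set j := (PySem.Chars.find l [c]).toNat with hj
  have htake : (l.take j).count c = 0 := by
    rw [List.count_eq_zero]
    intro hmem
    obtain ⟨i, hi, hget⟩ := List.mem_iff_getElem.mp hmem
    rw [List.length_take] at hi
    have hij : i < j := by omega
    have hil : i < l.length := by omega
    apply hmin i hij
    rw [singleton_prefix_iff_head?, List.head?_drop]
    have : l[i] = c := by
      rw [← hget]; simp [List.getElem_take]
    simp [List.getElem?_eq_getElem hil, this]
  conv_rhs => rw [← List.take_append_drop j l]
  rw [List.count_append, htake, Nat.zero_add]

lemma sum_map_split (m : List Char) (g : Char → Int) (p : Char → Bool) :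
    (m.map g).sum = ((m.filter p).map g).sum + ((m.filter (fun x => !p x)).map g).sum := by
  induction m with
  | nil => simp
  | cons x xs ih => by_cases h : p x <;> simp [h, ih] <;> ring

lemma sqSum_split (m : List Char) (c : Char) :
    sqSum m = (m.count c : Int) * (m.count c : Int)
      + sqSum (m.filter (fun b => !(b == c))) := by
  unfold sqSum
  rw [sum_map_split m _ (fun x => x == c)]
  congr 1
  · have h1 : (m.filter (fun x => x == c)).map (fun c' => (m.count c' : Int))
        = (m.filter (fun x => x == c)).map (fun _ => (m.count c : Int)) := by
      apply List.map_congr_left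
      intro x hx
      have := (List.mem_filter.mp hx).2
      simp at this; rw [this]
    rw [h1, PySem.List.sum_map_const_int]
    have h2 : (m.filter (fun x => x == c)).length = m.count c := by
      rw [List.count_eq_countP, List.countP_eq_length_filter]
    rw [h2]
  · apply congrArg List.sum
    apply List.map_congr_left
    intro x hx
    have hq := (List.mem_filter.mp hx).2
    exact congrArg Nat.cast (List.count_filter (p := fun b => !(b == c)) (a := x) (l := m) hq).symm

lemma staurtCondTrue (c : Char) :
    (c != 'a' || c != 'e' || c != 'i' || c != 'o' || c != 'u') = true := by
  by_cases h : c = 'a'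
  · subst h; decide
  · simp [h]

lemma slice_count (l : List Char) (c : Char) (hc : c ∈ l) :
    ((PySem.List.slice l (some (PySem.Chars.find l [c]))
        (some (PySem.Chars.len l))).count c : Int) = (l.count c : Int) := by
  obtain ⟨h0, hcnt⟩ := count_drop_find l c hc
  have hlen : PySem.Chars.len l = (l.length : Int) := by simp [PySem.Chars.len]
  rw [hlen, PySem.List.slice_toNat _ h0 (by positivity)]
  have ht : ((l.drop (PySem.Chars.find l [c]).toNat).take
      ((l.length : Int).toNat - (PySem.Chars.find l [c]).toNat))
      = l.drop (PySem.Chars.find l [c]).toNat := by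
    apply List.take_of_length_le
    simp
  rw [ht, hcnt]

lemma staurt_eq_sqSum (s : String) : staurt s = sqSum s.toList := by
  unfold staurt sqSum
  have h1 : s.toList.foldl
      (fun score c =>
        if c != 'a' || c != 'e' || c != 'i' || c != 'o' || c != 'u' then
          let count : Int :=
            ((PySem.List.slice s.toList (some (PySem.Chars.find s.toList [c]))
                (some (PySem.Chars.len s.toList))).count c : Int)
          score + count
        else score) 0
      = s.toList.foldl
      (fun score c => score +
          ((PySem.List.slice s.toList (some (PySem.Chars.find s.toList [c]))
              (some (PySem.Chars.len s.toList))).count c : Int)) 0 := by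
    simp only [staurtCondTrue, if_true]
  rw [h1, PySem.List.foldl_add]
  rw [Int.zero_add]
  apply congrArg List.sum
  apply List.map_congr_left
  intro c hc
  exact slice_count s.toList c hc

lemma loop_spec (m : List Char) (hp : m.Pairwise (· ≤ ·)) :
    ∀ (a : Char) (r sc : Int), (∀ b ∈ m, a ≤ b) →
      (let p := m.foldl staurtStep (sc, r, some a); p.1 + p.2.1 * p.2.1)
        = sc + (r + (m.count a : Int)) * (r + (m.count a : Int))
          + sqSum (m.filter (fun b => !(b == a))) := by
  induction m with
  | nil => intro a r sc _; simp [sqSum]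
  | cons c cs ih =>
    intro a r sc hle
    have hp' : cs.Pairwise (· ≤ ·) := hp.of_cons
    have hcle : ∀ b ∈ cs, c ≤ b := fun b hb => (List.pairwise_cons.mp hp).1 b hb
    by_cases hca : c = a
    · subst hca
      have hstep : staurtStep (sc, r, some c) c = (sc, r + 1, some c) := by
        simp [staurtStep]
      simp only [List.foldl_cons, hstep]
      rw [ih hp' c (r+1) sc hcle]
      simp [List.count_cons_self]
      ring
    · have hstep : staurtStep (sc, r, some a) c = (sc + r * r, 1, some c) := by
        simp [staurtStep, hca]
      simp only [List.foldl_cons, hstep]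
      rw [ih hp' c 1 (sc + r*r) hcle]
      have hanotin : a ∉ c :: cs := by
        intro hmem
        rcases List.mem_cons.mp hmem with h | h
        · exact hca h.symm
        · have h1 : a ≤ c := hle c (by simp)
          have h2 : c ≤ a := hcle a h
          exact hca (le_antisymm h2 h1)
      have hcnt0 : (c :: cs).count a = 0 := List.count_eq_zero.mpr hanotin
      have hfilt : (c :: cs).filter (fun b => !(b == a)) = c :: cs := by
        apply List.filter_eq_self.mpr
        intro b hb
        simp
        intro hba
        exact hanotin (hba ▸ hb)
      rw [hcnt0, hfilt]
      rw [sqSum_split (c :: cs) c]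
      have : (c :: cs).count c = cs.count c + 1 := by simp [List.count_cons_self]
      rw [this]
      have hfc : (c :: cs).filter (fun b => !(b == c)) = cs.filter (fun b => !(b == c)) := by
        simp
      rw [hfc]
      push_cast
      ring

lemma sqSum_perm {m l : List Char} (h : m.Perm l) : sqSum m = sqSum l := by
  unfold sqSum
  have h1 : m.map (fun c => (m.count c : Int)) = m.map (fun c => (l.count c : Int)) := by
    apply List.map_congr_left
    intro x _
    rw [h.count_eq]
  rw [h1]
  exact (h.map _).sum_eq

lemma staurt_alt_eq_sqSum (s : String) : staurt_alt s = sqSum s.toList := by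
  unfold staurt_alt
  have hperm := PySem.List.sorted_perm s.toList (fun x => x) false
  rw [← sqSum_perm hperm]
  have hp : (PySem.List.sorted s.toList (fun x => x) false).Pairwise (· ≤ ·) := by
    have := PySem.List.sorted_pairwise s.toList (fun x => x)
    simpa using this
  cases hm : PySem.List.sorted s.toList (fun x => x) false with
  | nil => simp [sqSum]
  | cons c cs =>
    rw [hm] at hp
    have hstep : staurtStep (0, 0, none) c = (0 + 0 * 0, 1, some c) := by
      simp [staurtStep]
    simp only [List.foldl_cons, hstep]
    have := loop_spec cs hp.of_cons c 1 (0 + 0*0)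
      (fun b hb => (List.pairwise_cons.mp hp).1 b hb)
    simp only at this
    rw [this]
    rw [sqSum_split (c :: cs) c]
    have h1 : (c :: cs).count c = cs.count c + 1 := by simp [List.count_cons_self]
    have h2 : (c :: cs).filter (fun b => !(b == c)) = cs.filter (fun b => !(b == c)) := by
      simp
    rw [h1, h2]
    push_cast
    ring

-- ===== VERDICT (by name: the statement is the Claim_ definition above) =====
theorem staurt_spec : Claim_equal_staurt := by
  intro s _
  unfold Spec_staurt
  rw [staurt_eq_sqSum, staurt_alt_eq_sqSum]
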